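-- pv_equiv track=rewrite | github.com/PawelFabrycki/CKE | zadanie61/main.py | szukankoSzescianu
-- ===== SOURCE A (Python) =====
-- def szukankoSzescianu(ciag):
--     n = 1
--     maksSzescian = 0
--     while n**3 <= max(ciag):
--         if n**3 in ciag:
--             maksSzescian = n**3
--         n += 1
--     return maksSzescian
-- ===== SOURCE B (Python) =====
-- def _icbrt(x):
--     # integer cube root of x >= 0 by binary search
--     lo, hi = 0, x
--     while lo < hi:
--         mid = (lo + hi + 1) // 2
--         if mid ** 3 <= x:
--             lo = mid
--         else:
--             hi = mid - 1
--     return lo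
--
--
-- def szukankoSzescianu(ciag):
--     best = 0
--     for x in ciag:
--         if x >= 1 and _icbrt(x) ** 3 == x and x > best:
--             best = x
--     return best
-- ===== Notes on version B (the rewrite author's own statement) =====
-- stated objective: faster
-- what changed: Instead of enumerating every cube from 1 up to max(ciag) and scanning the list for each (quadratic in practice), B scans the list once and tests each element for being a positive perfect cube with an integer-cube-root binary search, keeping the largest.
import Mathlib
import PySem

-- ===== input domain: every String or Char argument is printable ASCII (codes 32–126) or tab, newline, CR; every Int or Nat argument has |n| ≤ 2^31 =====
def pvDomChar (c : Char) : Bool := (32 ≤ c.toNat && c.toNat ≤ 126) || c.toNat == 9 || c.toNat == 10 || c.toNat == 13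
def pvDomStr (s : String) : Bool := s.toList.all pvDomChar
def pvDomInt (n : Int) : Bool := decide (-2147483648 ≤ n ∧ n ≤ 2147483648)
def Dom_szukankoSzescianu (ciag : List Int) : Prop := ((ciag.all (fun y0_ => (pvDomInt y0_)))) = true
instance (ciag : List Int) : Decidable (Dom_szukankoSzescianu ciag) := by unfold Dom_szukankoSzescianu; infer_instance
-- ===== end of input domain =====

-- B replaces A's enumeration of all cubes 1³..max(ciag) (a membership scan per cube) by a
-- single pass over the list testing each element with an integer-cube-root binary search.

-- ===== PORT A =====
-- the while loop: n counts up while n**3 <= max(ciag) (max is loop-invariant, passed as M)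
def pvALoop (ciag : List Int) (M : Int) (maks : Int) (n : Nat) : Int :=
  if h : ((n : Int)) ^ 3 ≤ M then
    pvALoop ciag M (if ((n : Int)) ^ 3 ∈ ciag then ((n : Int)) ^ 3 else maks) (n + 1)
  else maks
termination_by (M + 1 - (n : Int)).toNat
decreasing_by
  have hn : (n : Int) ≤ (n : Int) ^ 3 := by
    rcases (show (n : Int) = 0 ∨ 1 ≤ (n : Int) by exact_mod_cast Nat.eq_zero_or_pos n) with h0 | h1
    · simp [h0]
    · have h2 : 0 ≤ ((n : Int) - 1) * (n : Int) * ((n : Int) + 1) :=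
        mul_nonneg (mul_nonneg (by omega) (by omega)) (by omega)
      nlinarith [h2]
  omega

def szukankoSzescianu (ciag : List Int) : Int :=
  match PySem.List.max? ciag (fun y => y) with
  | none => 0          -- max([]) raises ValueError in Python; excluded by Pre_
  | some _M => pvALoop ciag _M 0 1

-- ===== PORT B =====
-- _icbrt: binary search for the integer cube root (lo, hi = 0, x)
def pvBsearch (x lo hi : Int) : Int :=
  if lo < hi then
    if (PySem.Int.floordiv (lo + hi + 1) 2) ^ 3 ≤ x then
      pvBsearch x (PySem.Int.floordiv (lo + hi + 1) 2) hi
    else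
      pvBsearch x lo (PySem.Int.floordiv (lo + hi + 1) 2 - 1)
  else lo
termination_by (hi - lo).toNat
decreasing_by
  all_goals
    rw [PySem.Int.floordiv_eq_ediv_of_pos (by norm_num : (0:Int) < 2)] at *
    omega

def pvIcbrt (x : Int) : Int := pvBsearch x 0 x

def szukankoSzescianu_alt (ciag : List Int) : Int :=
  ciag.foldl (fun best x => if 1 ≤ x ∧ pvIcbrt x ^ 3 = x ∧ best < x then x else best) 0

-- ===== PRECONDITION & SPEC =====
-- A raises ValueError on the empty list (max of an empty sequence); nothing else raises.
def Pre_szukankoSzescianu (ciag : List Int) : Prop := ciag ≠ []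
instance (ciag : List Int) : Decidable (Pre_szukankoSzescianu ciag) := by
  unfold Pre_szukankoSzescianu; infer_instance
def pvWitness_szukankoSzescianu : List Int := [8, 5]

def Spec_szukankoSzescianu (ciag : List Int) (out : Int) : Prop := out = szukankoSzescianu_alt ciag
instance (ciag : List Int) (out : Int) : Decidable (Spec_szukankoSzescianu ciag out) := by
  unfold Spec_szukankoSzescianu; infer_instance

-- ===== CLAIM (what is proved, stated in full; the proofs are below) =====
def Claim_equal_szukankoSzescianu : Prop := ∀ (ciag : List Int), Dom_szukankoSzescianu ciag → Pre_szukankoSzescianu ciag → Spec_szukankoSzescianu ciag (szukankoSzescianu ciag)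

-- ===== LEMMAS AND PROOFS =====

-- "x is a positive perfect cube"
def QCube (x : Int) : Prop := 1 ≤ x ∧ ∃ k : Int, 1 ≤ k ∧ k ^ 3 = x

lemma cube_le_cube_iff (a b : Int) : a ^ 3 ≤ b ^ 3 ↔ a ≤ b := by
  constructor <;> intro h <;>
    nlinarith [sq_nonneg (a + b), sq_nonneg (a - b), sq_nonneg a, sq_nonneg b]

lemma bsearch_spec : ∀ (x lo hi : Int), 0 ≤ lo → lo ≤ hi → lo ^ 3 ≤ x → x < (hi + 1) ^ 3 →
    0 ≤ pvBsearch x lo hi ∧ (pvBsearch x lo hi) ^ 3 ≤ x ∧ x < (pvBsearch x lo hi + 1) ^ 3 := by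
  intro x lo hi
  induction lo, hi using pvBsearch.induct (x := x) with
  | case1 lo hi hlt hmid ih =>
      intro h0 _ _ hx
      rw [pvBsearch, if_pos hlt, if_pos hmid]
      have hdiv := PySem.Int.floordiv_eq_ediv_of_pos (a := lo + hi + 1) (by norm_num : (0:Int) < 2)
      exact ih (by rw [hdiv]; omega) (by rw [hdiv]; omega) hmid hx
  | case2 lo hi hlt hmid ih =>
      intro h0 h1 hl hx
      rw [pvBsearch, if_pos hlt, if_neg hmid]
      have hdiv := PySem.Int.floordiv_eq_ediv_of_pos (a := lo + hi + 1) (by norm_num : (0:Int) < 2)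
      refine ih h0 (by rw [hdiv]; omega) hl ?_
      have hlt2 : x < (PySem.Int.floordiv (lo + hi + 1) 2) ^ 3 := not_le.mp hmid
      have : (PySem.Int.floordiv (lo + hi + 1) 2 - 1 + 1) ^ 3
           = (PySem.Int.floordiv (lo + hi + 1) 2) ^ 3 := by ring
      omega
  | case3 lo hi hlt =>
      intro h0 h1 hl hx
      rw [pvBsearch, if_neg hlt]
      have : lo = hi := by omega
      exact ⟨h0, hl, by rw [this]; exact hx⟩

lemma icbrt_correct (x : Int) (hx : 1 ≤ x) : (pvIcbrt x ^ 3 = x ↔ QCube x) := by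
  have hcub : x < (x + 1) ^ 3 := by nlinarith [sq_nonneg x, hx]
  have hs := bsearch_spec x 0 x (le_refl 0) (by omega) (by norm_num; omega) hcub
  obtain ⟨hr0, hr1, hr2⟩ := hs
  unfold pvIcbrt at *
  set r := pvBsearch x 0 x with hr
  constructor
  · intro h
    refine ⟨hx, r, ?_, h⟩
    by_contra hcon
    have hr00 : r = 0 := by omega
    rw [hr00] at h; norm_num at h; omega
  · rintro ⟨-, k, hk1, hk3⟩
    have h1 : r ≤ k := (cube_le_cube_iff r k).1 (by rw [hk3]; exact hr1)
    have h2 : k ≤ r := by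
      by_contra hc
      have : (r + 1) ^ 3 ≤ k ^ 3 := (cube_le_cube_iff (r + 1) k).2 (by omega)
      omega
    have : r = k := by omega
    rw [this]; exact hk3

-- characterization of B's fold
lemma bfold_spec : ∀ (l : List Int) (b : Int),
    (l.foldl (fun best x => if 1 ≤ x ∧ pvIcbrt x ^ 3 = x ∧ best < x then x else best) b = b ∨
      (l.foldl (fun best x => if 1 ≤ x ∧ pvIcbrt x ^ 3 = x ∧ best < x then x else best) b ∈ l ∧
       QCube (l.foldl (fun best x => if 1 ≤ x ∧ pvIcbrt x ^ 3 = x ∧ best < x then x else best) b))) ∧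
    b ≤ l.foldl (fun best x => if 1 ≤ x ∧ pvIcbrt x ^ 3 = x ∧ best < x then x else best) b ∧
    (∀ x ∈ l, QCube x → x ≤ l.foldl (fun best x => if 1 ≤ x ∧ pvIcbrt x ^ 3 = x ∧ best < x then x else best) b) := by
  intro l
  induction l with
  | nil =>
      intro b
      refine ⟨Or.inl rfl, le_refl _, ?_⟩
      intro x hx
      exact absurd hx (List.not_mem_nil)
  | cons y t ih =>
      intro b
      simp only [List.foldl_cons]
      by_cases hc : 1 ≤ y ∧ pvIcbrt y ^ 3 = y ∧ b < y
      · rw [if_pos hc]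
        obtain ⟨ih1, ih2, ih3⟩ := ih y
        refine ⟨?_, by omega, ?_⟩
        · rcases ih1 with h | ⟨hm, hq⟩
          · right
            refine ⟨by simp [h], ?_⟩
            rw [h]
            exact (icbrt_correct y hc.1).1 hc.2.1
          · exact Or.inr ⟨List.mem_cons_of_mem _ hm, hq⟩
        · intro x hx hqx
          rcases List.mem_cons.1 hx with rfl | hxt
          · omega
          · exact ih3 x hxt hqx
      · rw [if_neg hc]
        obtain ⟨ih1, ih2, ih3⟩ := ih b
        refine ⟨?_, ih2, ?_⟩
        · rcases ih1 with h | ⟨hm, hq⟩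
          · exact Or.inl h
          · exact Or.inr ⟨List.mem_cons_of_mem _ hm, hq⟩
        · intro x hx hqx
          rcases List.mem_cons.1 hx with rfl | hxt
          · -- head not taken: either ¬(b < x) so x ≤ b ≤ result, or the cube test would have passed
            have htest : pvIcbrt x ^ 3 = x := (icbrt_correct x hqx.1).2 hqx
            have : ¬ b < x := fun hbx => hc ⟨hqx.1, htest, hbx⟩
            omega
          · exact ih3 x hxt hqx

-- characterization of A's loop
lemma aloop_spec : ∀ (ciag : List Int) (M maks : Int) (n : Nat),
    1 ≤ n →
    (∀ x ∈ ciag, x ≤ M) →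
    (maks = 0 ∨ (maks ∈ ciag ∧ QCube maks)) →
    maks < ((n : Int)) ^ 3 →
    (∀ x ∈ ciag, QCube x → x ≤ maks ∨ ((n : Int)) ^ 3 ≤ x) →
    (pvALoop ciag M maks n = 0 ∨ (pvALoop ciag M maks n ∈ ciag ∧ QCube (pvALoop ciag M maks n))) ∧
    (∀ x ∈ ciag, QCube x → x ≤ pvALoop ciag M maks n) := by
  intro ciag M maks n
  induction maks, n using pvALoop.induct (ciag := ciag) (M := M) with
  | case1 maks n hle ih =>
      intro hn hM hmk hlt hcov
      rw [pvALoop, dif_pos hle]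
      have hn1 : (1 : Int) ≤ (n : Int) := by exact_mod_cast hn
      have hcube_lt : ((n : Int)) ^ 3 < ((n : Int) + 1) ^ 3 := by nlinarith [sq_nonneg ((n : Int))]
      have hcube_ge1 : (1 : Int) ≤ ((n : Int)) ^ 3 := by nlinarith [sq_nonneg ((n : Int) - 1)]
      have hcast : ((n + 1 : Nat) : Int) = (n : Int) + 1 := by push_cast; ring
      refine ih (by omega) hM ?_ ?_ ?_
      · by_cases hmem : ((n : Int)) ^ 3 ∈ ciag
        · rw [dif_pos hmem]
          exact Or.inr ⟨hmem, hcube_ge1, (n : Int), hn1, rfl⟩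
        · rw [dif_neg hmem]; exact hmk
      · rw [hcast]
        by_cases hmem : ((n : Int)) ^ 3 ∈ ciag
        · rw [dif_pos hmem]; omega
        · rw [dif_neg hmem]; omega
      · intro x hx hqx
        rw [hcast]
        rcases hcov x hx hqx with h | h
        · left
          by_cases hmem : ((n : Int)) ^ 3 ∈ ciag
          · rw [dif_pos hmem]; omega
          · rw [dif_neg hmem]; exact h
        · obtain ⟨hx1, k, hk1, hk3⟩ := hqx
          have hkn : (n : Int) ≤ k := (cube_le_cube_iff _ _).1 (by rw [hk3]; exact h)
          by_cases hkeq : k = (n : Int)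
          · left
            have hxeq : x = ((n : Int)) ^ 3 := by rw [← hk3, hkeq]
            rw [dif_pos (hxeq ▸ hx)]; omega
          · right
            have hk2 : (n : Int) + 1 ≤ k := by omega
            have := (cube_le_cube_iff ((n : Int) + 1) k).2 hk2
            omega
  | case2 maks n hle =>
      intro hn hM hmk hlt hcov
      rw [pvALoop, dif_neg hle]
      refine ⟨hmk, ?_⟩
      intro x hx hqx
      rcases hcov x hx hqx with h | h
      · exact h
      · have := hM x hx
        omega

-- ===== VERDICT (by name: the statement is the Claim_ definition above) =====
theorem szukankoSzescianu_spec : Claim_equal_szukankoSzescianu := by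
  intro ciag _ hpre
  unfold Spec_szukankoSzescianu szukankoSzescianu
  have hne : ciag ≠ [] := hpre
  obtain ⟨M, hM⟩ : ∃ M, PySem.List.max? ciag (fun y => y) = some M := by
    rcases h : PySem.List.max? ciag (fun y => y) with _ | M
    · exact absurd ((PySem.List.max?_eq_none_iff _ _).1 h) hne
    · exact ⟨M, rfl⟩
  rw [hM]
  show pvALoop ciag M 0 1 = _
  have hbound : ∀ x ∈ ciag, x ≤ M := fun x hx => PySem.List.max?_isMax hM x hx
  have hA := aloop_spec ciag M 0 1 (le_refl 1) hbound (Or.inl rfl) (by norm_num)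
    (fun x _ hqx => Or.inr (by norm_num; exact hqx.1))
  have hB := bfold_spec ciag 0
  unfold szukankoSzescianu_alt
  obtain ⟨hA1, hA2⟩ := hA
  obtain ⟨hB1, hB2, hB3⟩ := hB
  set a := pvALoop ciag M 0 1
  set b := ciag.foldl (fun best x => if 1 ≤ x ∧ pvIcbrt x ^ 3 = x ∧ best < x then x else best) 0
  have hab : a ≤ b := by
    rcases hA1 with h | ⟨hm, hq⟩
    · omega
    · exact hB3 a hm hq
  have hba : b ≤ a := by
    rcases hB1 with h | ⟨hm, hq⟩
    · rcases hA1 with h' | ⟨_, hq', _⟩ <;> omega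
    · exact hA2 b hm hq
  omega
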